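-- pv_equiv track=rewrite | github.com/ogiwelcome/Marathon | FMYC/fmyc2.py | solve
-- ===== SOURCE A (Python) =====
-- def solve(N,K,A):
--     ans=[]
--     sa=[0]*N
--     for i in range(N):
--         sa[i]=A[i]-i-1
--     for rep in range(K):
--         MIN=min(sa)
--         MAX=max(sa)
--         if MAX<=0:
--             break
--         mi=sa.index(MIN)
--         ma=sa.index(MAX)
--         if N<mi+1+sa[mi]+MAX:
--             MAX=N-(mi+1+sa[mi])
--         ans.append([ma+1,ma+1,mi+1,mi+1,MAX])
--         sa[ma]-=MAX
--         sa[mi]+=MAX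
--     for i in range(N):
--         sa[i]+=i+1
--     return sa,ans
-- ===== SOURCE B (Python) =====
-- def _insert(lst, p):
--     # insert pair p into a sorted list, keeping it sorted (before equal elements)
--     k = 0
--     while k < len(lst) and lst[k] < p:
--         k += 1
--     lst.insert(k, p)
--
--
-- def solve(N, K, A):
--     # Maintain two incrementally-updated ordered structures of (value, index)
--     # pairs instead of rescanning the array each step:
--     #   lo sorted by (value, index)  -> lo[0]  = (min value, first index of it)
--     #   hi sorted by (value, -index) -> hi[-1] = (max value, first index of it)
--     lo, hi = [], []
--     for i in range(N):
--         v = A[i] - i - 1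
--         _insert(lo, (v, i))
--         _insert(hi, (v, -i))
--     ans = []
--     for _ in range(K):
--         if not hi or hi[-1][0] <= 0:
--             break
--         MIN, mi = lo[0]
--         MAXv, nma = hi[-1]
--         ma = -nma
--         MAX = MAXv
--         if N < mi + 1 + MIN + MAX:
--             MAX = N - (mi + 1 + MIN)
--         ans.append([ma + 1, ma + 1, mi + 1, mi + 1, MAX])
--         if mi != ma:
--             lo.remove((MAXv, ma))
--             hi.remove((MAXv, -ma))
--             lo.remove((MIN, mi))
--             hi.remove((MIN, -mi))
--             _insert(lo, (MAXv - MAX, ma))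
--             _insert(hi, (MAXv - MAX, -ma))
--             _insert(lo, (MIN + MAX, mi))
--             _insert(hi, (MIN + MAX, -mi))
--     sa = [0] * N
--     for v, i in lo:
--         sa[i] = v + i + 1
--     return sa, ans
-- ===== Notes on version B (the rewrite author's own statement) =====
-- stated objective: alternative
-- what changed: Instead of rescanning the array four times per step (min, max, two .index searches), B maintains two incrementally-updated ordered lists of (value,index) pairs -- one keyed (value,index) whose head is the min with its first index, one keyed (value,-index) whose last element is the max with its first index -- and each step removes/reinserts just the two affected pairs; the final array is rebuilt from the pair list.
import Mathlib
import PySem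

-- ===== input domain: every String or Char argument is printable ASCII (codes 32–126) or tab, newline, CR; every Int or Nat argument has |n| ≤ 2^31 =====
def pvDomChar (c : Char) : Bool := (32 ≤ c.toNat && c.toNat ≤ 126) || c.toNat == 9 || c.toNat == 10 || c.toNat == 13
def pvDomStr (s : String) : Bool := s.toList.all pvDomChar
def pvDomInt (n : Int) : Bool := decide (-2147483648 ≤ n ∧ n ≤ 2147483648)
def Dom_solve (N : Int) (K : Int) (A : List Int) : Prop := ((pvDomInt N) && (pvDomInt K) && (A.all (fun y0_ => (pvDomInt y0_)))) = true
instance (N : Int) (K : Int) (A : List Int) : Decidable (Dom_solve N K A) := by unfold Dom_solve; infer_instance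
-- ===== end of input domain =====

-- B replaces A's four per-step whole-array scans (min, max, two .index searches) by two
-- incrementally-updated ordered lists of (value,index) pairs, removing/reinserting only
-- the two affected pairs each step (objective: alternative; A mutates only local lists,
-- so the equivalence proved here is about return values).

-- ===== PORT A =====
def solveInitA (N : Int) (A : List Int) : List Int :=
  (PySem.List.pyRange 0 N).foldl
    (fun sa i => PySem.List.pySetD sa i (PySem.List.pyGetD A i 0 - i - 1))
    (List.replicate N.toNat 0)

def solveLoopA (N : Int) : Nat → List Int → List (List Int) → List Int × List (List Int)
  | 0, sa, ans => (sa, ans)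
  | fuel+1, sa, ans =>
    let MIN := (PySem.List.min? sa (fun x => x)).getD 0
    let MAX := (PySem.List.max? sa (fun x => x)).getD 0
    if MAX ≤ 0 then (sa, ans)
    else
      let mi : Nat := (PySem.List.index? sa MIN).getD 0
      let ma : Nat := (PySem.List.index? sa MAX).getD 0
      let sami := PySem.List.pyGetD sa (mi : Int) 0
      let MAX' := if N < (mi : Int) + 1 + sami + MAX then N - ((mi : Int) + 1 + sami) else MAX
      let ans' := ans ++ [[(ma : Int) + 1, (ma : Int) + 1, (mi : Int) + 1, (mi : Int) + 1, MAX']]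
      let sa1 := PySem.List.pySetD sa (ma : Int) (PySem.List.pyGetD sa (ma : Int) 0 - MAX')
      let sa2 := PySem.List.pySetD sa1 (mi : Int) (PySem.List.pyGetD sa1 (mi : Int) 0 + MAX')
      solveLoopA N fuel sa2 ans'

def solveFinA (N : Int) (sa : List Int) : List Int :=
  (PySem.List.pyRange 0 N).foldl
    (fun sa i => PySem.List.pySetD sa i (PySem.List.pyGetD sa i 0 + i + 1)) sa

def solve (N : Int) (K : Int) (A : List Int) : List Int × List (List Int) :=
  let p := solveLoopA N K.toNat (solveInitA N A) []
  (solveFinA N p.1, p.2)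

-- ===== PORT B =====
-- Python tuple comparison (v, i) < (w, j), lexicographic
def pltB (p q : Int × Int) : Bool := p.1 < q.1 || (p.1 == q.1 && p.2 < q.2)

-- Source B's hand-written _insert: advance while lst[k] < p, insert there
def pinsert : List (Int × Int) → (Int × Int) → List (Int × Int)
  | [], p => [p]
  | q :: t, p => if pltB q p then q :: pinsert t p else p :: q :: t

-- Source B's lst.remove(p) (remove first occurrence; never absent during a run)
def premove (l : List (Int × Int)) (p : Int × Int) : List (Int × Int) :=
  (PySem.List.remove? l p).getD l

def solveInitB (N : Int) (A : List Int) : List (Int × Int) × List (Int × Int) :=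
  (PySem.List.pyRange 0 N).foldl
    (fun st i =>
      let v := PySem.List.pyGetD A i 0 - i - 1
      (pinsert st.1 (v, i), pinsert st.2 (v, -i)))
    ([], [])

def solveLoopB (N : Int) :
    Nat → List (Int × Int) → List (Int × Int) → List (List Int) →
    List (Int × Int) × List (Int × Int) × List (List Int)
  | 0, lo, hi, ans => (lo, hi, ans)
  | fuel+1, lo, hi, ans =>
    match hi.getLast? with
    | none => (lo, hi, ans)
    | some (MAXv, nma) =>
      if MAXv ≤ 0 then (lo, hi, ans)
      else
        let p := lo.headD (0, 0)
        let MIN := p.1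
        let mi := p.2
        let ma := -nma
        let MAX := if N < mi + 1 + MIN + MAXv then N - (mi + 1 + MIN) else MAXv
        let ans' := ans ++ [[ma + 1, ma + 1, mi + 1, mi + 1, MAX]]
        if mi ≠ ma then
          let lo1 := premove (premove lo (MAXv, ma)) (MIN, mi)
          let hi1 := premove (premove hi (MAXv, -ma)) (MIN, -mi)
          let lo2 := pinsert (pinsert lo1 (MAXv - MAX, ma)) (MIN + MAX, mi)
          let hi2 := pinsert (pinsert hi1 (MAXv - MAX, -ma)) (MIN + MAX, -mi)
          solveLoopB N fuel lo2 hi2 ans'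
        else
          solveLoopB N fuel lo hi ans'

def solve_alt (N : Int) (K : Int) (A : List Int) : List Int × List (List Int) :=
  let st := solveInitB N A
  let r := solveLoopB N K.toNat st.1 st.2 []
  (r.1.foldl (fun sa p => PySem.List.pySetD sa p.2 (p.1 + p.2 + 1)) (List.replicate N.toNat 0),
   r.2.2)

-- ===== PRECONDITION & SPEC =====
-- Pre_ excludes exactly the inputs where A raises: K > 0 with N ≤ 0 (min([]) is a
-- ValueError) and 0 < N > len(A) (IndexError while building sa).
def Pre_solve (N : Int) (K : Int) (A : List Int) : Prop :=
  (N ≤ 0 ∧ K ≤ 0) ∨ (0 < N ∧ N ≤ (A.length : Int))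
instance (N : Int) (K : Int) (A : List Int) : Decidable (Pre_solve N K A) := by unfold Pre_solve; infer_instance

def pvWitness_solve : Int × Int × List Int := (3, 2, [5, 1, 2])

def Spec_solve (N : Int) (K : Int) (A : List Int) (out : List Int × List (List Int)) : Prop := out = solve_alt N K A
instance (N : Int) (K : Int) (A : List Int) (out : List Int × List (List Int)) : Decidable (Spec_solve N K A out) := by unfold Spec_solve; infer_instance

-- ===== CLAIM (what is proved, stated in full; the proofs are below) =====
def Claim_equal_solve : Prop := ∀ (N : Int) (K : Int) (A : List Int), Dom_solve N K A → Pre_solve N K A → Spec_solve N K A (solve N K A)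

-- ===== LEMMAS AND PROOFS =====

-- pair lists B maintains, as functions of A's array
def pairsLo (sa : List Int) : List (Int × Int) :=
  (PySem.List.enumerate sa).map (fun q => (q.2, q.1))
def pairsHi (sa : List Int) : List (Int × Int) :=
  (PySem.List.enumerate sa).map (fun q => (q.2, -q.1))

def PltP (p q : Int × Int) : Prop := pltB p q = true

lemma pltP_total {p q : Int × Int} (h1 : ¬ PltP q p) (h2 : q ≠ p) : PltP p q := by
  obtain ⟨a, b⟩ := p; obtain ⟨c, d⟩ := q
  simp only [PltP, pltB, Prod.mk.injEq, ne_eq, not_and, Bool.or_eq_true, Bool.and_eq_true,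
    decide_eq_true_eq, beq_iff_eq] at *
  by_cases hac : a = c
  · subst hac; simp at h2 ⊢; omega
  · omega

lemma pltP_trans {p q r : Int × Int} (h1 : PltP p q) (h2 : PltP q r) : PltP p r := by
  obtain ⟨a, b⟩ := p; obtain ⟨c, d⟩ := q; obtain ⟨e, f⟩ := r
  simp only [PltP, pltB, Bool.or_eq_true, Bool.and_eq_true, decide_eq_true_eq, beq_iff_eq] at *
  omega

lemma pinsert_perm (l : List (Int × Int)) (p : Int × Int) : (pinsert l p).Perm (p :: l) := by
  induction l with
  | nil => simp [pinsert]
  | cons q t ih =>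
    unfold pinsert
    split
    · exact ((ih.cons q).trans (List.Perm.swap p q t)).symm.symm
    · exact List.Perm.refl _

lemma pinsert_pairwise {l : List (Int × Int)} {p : Int × Int}
    (hs : l.Pairwise PltP) (hnm : p ∉ l) : (pinsert l p).Pairwise PltP := by
  induction l with
  | nil => simp [pinsert]
  | cons q t ih =>
    rw [List.pairwise_cons] at hs
    obtain ⟨hq, ht⟩ := hs
    unfold pinsert
    split
    · rename_i hlt
      rw [List.pairwise_cons]
      refine ⟨?_, ih ht (by simp at hnm; exact fun h => hnm.2 h)⟩
      intro b hb
      have : b ∈ p :: t := (pinsert_perm t p).mem_iff.mp hb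
      rcases List.mem_cons.mp this with h | h
      · subst h; exact hlt
      · exact hq b h
    · rename_i hnlt
      rw [List.pairwise_cons]
      constructor
      · intro b hb
        rcases List.mem_cons.mp hb with h | h
        · subst h
          exact pltP_total hnlt (by simp at hnm; exact fun h => (hnm.1 h.symm).elim)
        · exact pltP_trans (pltP_total hnlt (by simp at hnm; exact fun h => (hnm.1 h.symm).elim)) (hq b h)
      · exact List.pairwise_cons.mpr ⟨hq, ht⟩

lemma premove_of_mem {l : List (Int × Int)} {p : Int × Int} (h : p ∈ l) :
    premove l p = l.erase p := by
  unfold premove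
  rw [PySem.List.remove?_eq_some_erase _ p h]
  rfl

-- snd components of pairsLo/pairsHi are distinct, strictly increasing / decreasing
lemma pairsLo_pairwise_snd (sa : List Int) : (pairsLo sa).Pairwise (fun a b => a.2 < b.2) := by
  unfold pairsLo
  refine List.Pairwise.map _ ?_ (PySem.List.pairwise_lt_enumerate sa 0)
  intro a b h; exact h

lemma pairsHi_pairwise_snd (sa : List Int) : (pairsHi sa).Pairwise (fun a b => b.2 < a.2) := by
  unfold pairsHi
  refine List.Pairwise.map _ ?_ (PySem.List.pairwise_lt_enumerate sa 0)
  intro a b h; omega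

lemma mem_pairsLo {sa : List Int} {p : Int × Int} :
    p ∈ pairsLo sa ↔ ∃ (k : Nat) (h : k < sa.length), p = (sa[k], (k : Int)) := by
  unfold pairsLo
  simp only [List.mem_map, PySem.List.mem_enumerate_iff]
  constructor
  · rintro ⟨q, ⟨k, hk, rfl⟩, rfl⟩; exact ⟨k, hk, by simp⟩
  · rintro ⟨k, hk, rfl⟩; exact ⟨((k : Int), sa[k]), ⟨k, hk, by simp⟩, rfl⟩

lemma mem_pairsHi {sa : List Int} {p : Int × Int} :
    p ∈ pairsHi sa ↔ ∃ (k : Nat) (h : k < sa.length), p = (sa[k], -(k : Int)) := by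
  unfold pairsHi
  simp only [List.mem_map, PySem.List.mem_enumerate_iff]
  constructor
  · rintro ⟨q, ⟨k, hk, rfl⟩, rfl⟩; exact ⟨k, hk, by simp⟩
  · rintro ⟨k, hk, rfl⟩; exact ⟨((k : Int), sa[k]), ⟨k, hk, by simp⟩, rfl⟩

lemma pairsLo_nodup (sa : List Int) : (pairsLo sa).Nodup :=
  (pairsLo_pairwise_snd sa).imp (fun h he => by subst he; omega)

lemma pairsHi_nodup (sa : List Int) : (pairsHi sa).Nodup :=
  (pairsHi_pairwise_snd sa).imp (fun h he => by subst he; omega)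

lemma pltP_iff (p q : Int × Int) : PltP p q ↔ (p.1 < q.1 ∨ (p.1 = q.1 ∧ p.2 < q.2)) := by
  obtain ⟨a, b⟩ := p; obtain ⟨c, d⟩ := q
  simp [PltP, pltB]

lemma index?_of_first {xs : List Int} {v : Int} {k : Nat} (hk : k < xs.length)
    (hv : xs[k] = v) (hfirst : ∀ j (hj : j < k), xs[j]'(by omega) ≠ v) :
    PySem.List.index? xs v = some k := by
  rw [PySem.List.index?_eq_some_iff]
  refine ⟨xs.take k, xs.drop (k+1), ?_, ?_, ?_⟩
  · conv_lhs => rw [← List.take_append_drop k xs]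
    rw [List.drop_eq_getElem_cons hk, hv]
  · simp; omega
  · intro hmem
    obtain ⟨j, hj, hje⟩ := List.mem_iff_getElem.mp hmem
    have hjk : j < k := by simp at hj; omega
    exact hfirst j hjk (by rw [← hje]; exact (List.getElem_take).symm)

-- head of the sorted lo list = (min value, first index of it)
lemma lo_head (sa : List Int) (h : Int) (t : List Int) (hsa : sa = h :: t)
    (lo : List (Int × Int)) (hperm : lo.Perm (pairsLo sa)) (hsort : lo.Pairwise PltP) :
    ∃ (i : Nat),
      PySem.List.index? sa ((PySem.List.min? sa (fun x => x)).getD 0) = some i ∧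
      lo.headD (0, 0) = ((PySem.List.min? sa (fun x => x)).getD 0, (i : Int)) := by
  subst hsa
  have hmin : PySem.List.min? (h :: t) (fun x => x) = some (List.foldl min h t) :=
    PySem.List.min?_id_cons h t
  set mv := List.foldl min h t with hmv
  have hgd : (PySem.List.min? (h :: t) (fun x => x)).getD 0 = mv := by rw [hmin]; rfl
  have hmvmem : mv ∈ h :: t := PySem.List.min?_mem hmin
  have hmvmin : ∀ y ∈ h :: t, mv ≤ y := by
    intro y hy; simpa using PySem.List.min?_isMin hmin y hy
  cases lo with
  | nil =>
    exfalso
    have := hperm.length_eq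
    simp [pairsLo, PySem.List.length_enumerate] at this
  | cons m rest =>
    have hmmem : m ∈ pairsLo (h :: t) := hperm.mem_iff.mp (List.mem_cons_self ..)
    obtain ⟨i0, hi0lt, hm⟩ := mem_pairsLo.mp hmmem
    have hdom : ∀ q ∈ pairsLo (h :: t), q = m ∨ PltP m q := by
      intro q hq
      rcases List.mem_cons.mp (hperm.mem_iff.mpr hq) with h' | h'
      · exact Or.inl h'
      · exact Or.inr ((List.pairwise_cons.mp hsort).1 q h')
    obtain ⟨kv, hkvlt, hkv⟩ := List.mem_iff_getElem.mp hmvmem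
    have hpair : ((h :: t)[kv], (kv : Int)) ∈ pairsLo (h :: t) := mem_pairsLo.mpr ⟨kv, hkvlt, rfl⟩
    have hval : m.1 = mv := by
      have h1 : mv ≤ m.1 := by
        rw [hm]; exact hmvmin _ (List.getElem_mem hi0lt)
      rcases hdom _ hpair with h' | h'
      · rw [← h']; simpa using hkv
      · rcases (pltP_iff _ _).mp h' with h2 | ⟨h2, _⟩
        · simp [hkv] at h2; omega
        · simp [hkv] at h2; omega
    refine ⟨i0, ?_, ?_⟩
    · rw [hgd, ← hval]
      refine index?_of_first hi0lt (by rw [hm]) ?_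
      intro j hj hje
      have hpj : (m.1, (j : Int)) ∈ pairsLo (h :: t) := by
        refine mem_pairsLo.mpr ⟨j, by omega, ?_⟩
        rw [hje]
      rcases hdom _ hpj with h' | h'
      · have : (j : Int) = m.2 := congrArg Prod.snd h'
        rw [hm] at this; simp at this; omega
      · rcases (pltP_iff _ _).mp h' with h2 | ⟨_, h2⟩
        · simp at h2
        · rw [hm] at h2; simp at h2; omega
    · rw [hgd, ← hval, List.headD_cons, hm]

-- last of the sorted hi list = (max value, minus the first index of it)
lemma hi_last (sa : List Int) (h : Int) (t : List Int) (hsa : sa = h :: t)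
    (hi : List (Int × Int)) (hperm : hi.Perm (pairsHi sa)) (hsort : hi.Pairwise PltP) :
    ∃ (j : Nat),
      PySem.List.index? sa ((PySem.List.max? sa (fun x => x)).getD 0) = some j ∧
      hi.getLast? = some ((PySem.List.max? sa (fun x => x)).getD 0, -(j : Int)) := by
  subst hsa
  have hmax : PySem.List.max? (h :: t) (fun x => x) = some (List.foldl max h t) :=
    PySem.List.max?_id_cons h t
  set mv := List.foldl max h t with hmv
  have hgd : (PySem.List.max? (h :: t) (fun x => x)).getD 0 = mv := by rw [hmax]; rfl
  have hmvmem : mv ∈ h :: t := PySem.List.max?_mem hmax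
  have hmvmax : ∀ y ∈ h :: t, y ≤ mv := by
    intro y hy; simpa using PySem.List.max?_isMax hmax y hy
  have hrevperm : hi.reverse.Perm (pairsHi (h :: t)) := (List.reverse_perm hi).trans hperm
  have hrevsort : hi.reverse.Pairwise (fun a b => PltP b a) := List.pairwise_reverse.mp (by simpa)
  rw [List.getLast?_eq_head?_reverse]
  cases hL : hi.reverse with
  | nil =>
    exfalso
    rw [hL] at hrevperm
    have := hrevperm.length_eq
    simp [pairsHi, PySem.List.length_enumerate] at this
  | cons m rest =>
    rw [hL] at hrevperm hrevsort
    have hmmem : m ∈ pairsHi (h :: t) := hrevperm.mem_iff.mp (List.mem_cons_self ..)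
    obtain ⟨i0, hi0lt, hm⟩ := mem_pairsHi.mp hmmem
    have hdom : ∀ q ∈ pairsHi (h :: t), q = m ∨ PltP q m := by
      intro q hq
      rcases List.mem_cons.mp (hrevperm.mem_iff.mpr hq) with h' | h'
      · exact Or.inl h'
      · exact Or.inr ((List.pairwise_cons.mp hrevsort).1 q h')
    obtain ⟨kv, hkvlt, hkv⟩ := List.mem_iff_getElem.mp hmvmem
    have hpair : ((h :: t)[kv], -(kv : Int)) ∈ pairsHi (h :: t) := mem_pairsHi.mpr ⟨kv, hkvlt, rfl⟩
    have hval : m.1 = mv := by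
      have h1 : m.1 ≤ mv := by
        rw [hm]; exact hmvmax _ (List.getElem_mem hi0lt)
      rcases hdom _ hpair with h' | h'
      · rw [← h']; simpa using hkv
      · rcases (pltP_iff _ _).mp h' with h2 | ⟨h2, _⟩
        · simp [hkv] at h2; omega
        · simp [hkv] at h2; omega
    refine ⟨i0, ?_, ?_⟩
    · rw [hgd, ← hval]
      refine index?_of_first hi0lt (by rw [hm]) ?_
      intro j hj hje
      have hpj : (m.1, -(j : Int)) ∈ pairsHi (h :: t) := by
        refine mem_pairsHi.mpr ⟨j, by omega, ?_⟩
        rw [hje]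
      rcases hdom _ hpj with h' | h'
      · have : -(j : Int) = m.2 := congrArg Prod.snd h'
        rw [hm] at this; simp at this; omega
      · rcases (pltP_iff _ _).mp h' with h2 | ⟨_, h2⟩
        · simp at h2
        · rw [hm] at h2; simp at h2; omega
    · rw [hgd, ← hval, List.head?_cons, hm]

-- pairsLo/pairsHi after a set: replace the unique pair at that index
lemma pairsLo_decomp (u : List Int) (y : Int) (w : List Int) :
    pairsLo (u ++ y :: w)
      = (PySem.List.enumerate u).map (fun q => (q.2, q.1))
        ++ (y, (u.length : Int))
          :: (PySem.List.enumerate w ((u.length : Int) + 1)).map (fun q => (q.2, q.1)) := by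
  unfold pairsLo
  rw [PySem.List.enumerate_append, PySem.List.enumerate_cons, List.map_append, List.map_cons]
  norm_num

lemma pairsHi_decomp (u : List Int) (y : Int) (w : List Int) :
    pairsHi (u ++ y :: w)
      = (PySem.List.enumerate u).map (fun q => (q.2, -q.1))
        ++ (y, -(u.length : Int))
          :: (PySem.List.enumerate w ((u.length : Int) + 1)).map (fun q => (q.2, -q.1)) := by
  unfold pairsHi
  rw [PySem.List.enumerate_append, PySem.List.enumerate_cons, List.map_append, List.map_cons]
  norm_num

lemma pairsLo_set (sa : List Int) (k : Nat) (x : Int) (hk : k < sa.length) :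
    (pairsLo (sa.set k x)).Perm ((x, (k : Int)) :: (pairsLo sa).erase (sa[k], (k : Int))) := by
  have hsa : sa = sa.take k ++ sa[k] :: sa.drop (k+1) := by
    conv_lhs => rw [← List.take_append_drop k sa]
    rw [List.drop_eq_getElem_cons hk]
  have hlen : (sa.take k).length = k := by simp; omega
  have hnm : (sa[k], (k : Int)) ∉ (PySem.List.enumerate (sa.take k)).map
      (fun q => ((q.2 : Int), q.1)) := by
    intro hmem
    obtain ⟨q, hq, he⟩ := List.mem_map.mp hmem
    obtain ⟨jj, hjj, rfl⟩ := (PySem.List.mem_enumerate_iff _ _ _).mp hq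
    have h2 := congrArg Prod.snd he
    simp at h2
    rw [hlen] at hjj
    omega
  have hps : pairsLo sa
      = (PySem.List.enumerate (sa.take k)).map (fun q => (q.2, q.1))
        ++ (sa[k], ((sa.take k).length : Int))
          :: (PySem.List.enumerate (sa.drop (k+1)) (((sa.take k).length : Int) + 1)).map
              (fun q => (q.2, q.1)) := by
    conv_lhs => rw [hsa]
    exact pairsLo_decomp _ _ _
  have herase : (pairsLo sa).erase (sa[k], (k : Int))
      = (PySem.List.enumerate (sa.take k)).map (fun q => (q.2, q.1))
        ++ (PySem.List.enumerate (sa.drop (k+1)) (((sa.take k).length : Int) + 1)).map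
            (fun q => (q.2, q.1)) := by
    rw [hps, hlen, List.erase_append_right _ hnm, List.erase_cons_head]
  have hset : pairsLo (sa.set k x)
      = (PySem.List.enumerate (sa.take k)).map (fun q => (q.2, q.1))
        ++ (x, (k : Int))
          :: (PySem.List.enumerate (sa.drop (k+1)) (((sa.take k).length : Int) + 1)).map
              (fun q => (q.2, q.1)) := by
    rw [List.set_eq_take_cons_drop x hk, pairsLo_decomp, hlen]
  rw [hset, herase]
  exact List.perm_middle

lemma pairsHi_set (sa : List Int) (k : Nat) (x : Int) (hk : k < sa.length) :
    (pairsHi (sa.set k x)).Perm ((x, -(k : Int)) :: (pairsHi sa).erase (sa[k], -(k : Int))) := by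
  have hsa : sa = sa.take k ++ sa[k] :: sa.drop (k+1) := by
    conv_lhs => rw [← List.take_append_drop k sa]
    rw [List.drop_eq_getElem_cons hk]
  have hlen : (sa.take k).length = k := by simp; omega
  have hnm : (sa[k], -(k : Int)) ∉ (PySem.List.enumerate (sa.take k)).map
      (fun q => ((q.2 : Int), -q.1)) := by
    intro hmem
    obtain ⟨q, hq, he⟩ := List.mem_map.mp hmem
    obtain ⟨jj, hjj, rfl⟩ := (PySem.List.mem_enumerate_iff _ _ _).mp hq
    have h2 := congrArg Prod.snd he
    simp at h2
    rw [hlen] at hjj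
    omega
  have hps : pairsHi sa
      = (PySem.List.enumerate (sa.take k)).map (fun q => (q.2, -q.1))
        ++ (sa[k], -((sa.take k).length : Int))
          :: (PySem.List.enumerate (sa.drop (k+1)) (((sa.take k).length : Int) + 1)).map
              (fun q => (q.2, -q.1)) := by
    conv_lhs => rw [hsa]
    exact pairsHi_decomp _ _ _
  have herase : (pairsHi sa).erase (sa[k], -(k : Int))
      = (PySem.List.enumerate (sa.take k)).map (fun q => (q.2, -q.1))
        ++ (PySem.List.enumerate (sa.drop (k+1)) (((sa.take k).length : Int) + 1)).map
            (fun q => (q.2, -q.1)) := by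
    rw [hps, hlen, List.erase_append_right _ hnm, List.erase_cons_head]
  have hset : pairsHi (sa.set k x)
      = (PySem.List.enumerate (sa.take k)).map (fun q => (q.2, -q.1))
        ++ (x, -(k : Int))
          :: (PySem.List.enumerate (sa.drop (k+1)) (((sa.take k).length : Int) + 1)).map
              (fun q => (q.2, -q.1)) := by
    rw [List.set_eq_take_cons_drop x hk, pairsHi_decomp, hlen]
  rw [hset, herase]
  exact List.perm_middle

lemma mem_erase2 {P : List (Int × Int)} (hnd : P.Nodup) (a b q : Int × Int)
    (hq : q ∈ (P.erase a).erase b) : q ≠ a ∧ q ≠ b ∧ q ∈ P := by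
  have h1 := (List.Nodup.mem_erase_iff (List.Nodup.erase a hnd)).mp hq
  have h2 := (List.Nodup.mem_erase_iff hnd).mp h1.2
  exact ⟨h2.1, h1.1, h2.2⟩

-- one step's remove/remove/insert/insert keeps lo a sorted permutation of the pairs
lemma couple_update_lo (h : Int) (t : List Int) (i j : Nat)
    (hilt : i < (h :: t).length) (hjlt : j < (h :: t).length) (hij : i ≠ j) (X Y : Int)
    (lo : List (Int × Int)) (hp1 : lo.Perm (pairsLo (h :: t))) (hs1 : lo.Pairwise PltP) :
    (pinsert (pinsert (premove (premove lo ((h :: t)[j], (j : Int))) ((h :: t)[i], (i : Int)))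
        (X, (j : Int))) (Y, (i : Int))).Perm (pairsLo (((h :: t).set j X).set i Y)) ∧
    (pinsert (pinsert (premove (premove lo ((h :: t)[j], (j : Int))) ((h :: t)[i], (i : Int)))
        (X, (j : Int))) (Y, (i : Int))).Pairwise PltP := by
  have hnd := pairsLo_nodup (h :: t)
  have hlonodup : lo.Nodup := hp1.symm.nodup hnd
  have hjmem : ((h :: t)[j], (j : Int)) ∈ pairsLo (h :: t) := mem_pairsLo.mpr ⟨j, hjlt, rfl⟩
  have himem : ((h :: t)[i], (i : Int)) ∈ pairsLo (h :: t) := mem_pairsLo.mpr ⟨i, hilt, rfl⟩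
  have hjlo : ((h :: t)[j], (j : Int)) ∈ lo := hp1.mem_iff.mpr hjmem
  have hne1 : ((h :: t)[i], (i : Int)) ≠ ((h :: t)[j], (j : Int)) := by
    intro he; have := congrArg Prod.snd he; simp at this; omega
  rw [premove_of_mem hjlo]
  have hilo : ((h :: t)[i], (i : Int)) ∈ lo.erase ((h :: t)[j], (j : Int)) :=
    (List.Nodup.mem_erase_iff hlonodup).mpr ⟨hne1, hp1.mem_iff.mpr himem⟩
  rw [premove_of_mem hilo]
  have hLs : ((lo.erase ((h :: t)[j], (j : Int))).erase ((h :: t)[i], (i : Int))).Pairwise PltP :=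
    List.Pairwise.erase _ (List.Pairwise.erase _ hs1)
  have hLperm : ((lo.erase ((h :: t)[j], (j : Int))).erase ((h :: t)[i], (i : Int))).Perm
      (((pairsLo (h :: t)).erase ((h :: t)[j], (j : Int))).erase ((h :: t)[i], (i : Int))) :=
    (hp1.erase _).erase _
  have hLsnd : ∀ q ∈ (lo.erase ((h :: t)[j], (j : Int))).erase ((h :: t)[i], (i : Int)),
      q.2 ≠ (j : Int) ∧ q.2 ≠ (i : Int) := by
    intro q hq
    obtain ⟨hq1, hq2, hq3⟩ := mem_erase2 hnd _ _ q (hLperm.mem_iff.mp hq)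
    obtain ⟨k, hk, rfl⟩ := mem_pairsLo.mp hq3
    constructor
    · intro he
      have hkj : k = j := by simp at he; omega
      subst hkj; exact hq1 rfl
    · intro he
      have hki : k = i := by simp at he; omega
      subst hki; exact hq2 rfl
  have hn1 : (X, (j : Int)) ∉ (lo.erase ((h :: t)[j], (j : Int))).erase ((h :: t)[i], (i : Int)) :=
    fun hmem => ((hLsnd _ hmem).1 rfl)
  have hs3 := pinsert_pairwise hLs hn1
  have hn2 : (Y, (i : Int)) ∉ pinsert
      ((lo.erase ((h :: t)[j], (j : Int))).erase ((h :: t)[i], (i : Int))) (X, (j : Int)) := by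
    intro hmem
    rcases List.mem_cons.mp ((pinsert_perm _ _).mem_iff.mp hmem) with he | hin
    · have := congrArg Prod.snd he; simp at this; omega
    · exact (hLsnd _ hin).2 rfl
  refine ⟨?_, pinsert_pairwise hs3 hn2⟩
  have hget : ((h :: t).set j X)[i]'(by simpa using hilt) = (h :: t)[i] :=
    List.getElem_set_ne (by omega) _
  have e1 : (pairsLo (((h :: t).set j X).set i Y)).Perm
      ((Y, (i : Int)) :: (pairsLo ((h :: t).set j X)).erase ((h :: t)[i], (i : Int))) := by
    have := pairsLo_set ((h :: t).set j X) i Y (by simpa using hilt)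
    rwa [hget] at this
  have e2 : ((pairsLo ((h :: t).set j X)).erase ((h :: t)[i], (i : Int))).Perm
      ((X, (j : Int)) :: ((pairsLo (h :: t)).erase ((h :: t)[j], (j : Int))).erase
        ((h :: t)[i], (i : Int))) := by
    have h3 := (pairsLo_set (h :: t) j X hjlt).erase ((h :: t)[i], (i : Int))
    rwa [List.erase_cons_tail (by
      simp only [beq_iff_eq]
      intro he
      have := congrArg Prod.snd he
      simp at this; omega)] at h3
  have eB : (pinsert (pinsert
      ((lo.erase ((h :: t)[j], (j : Int))).erase ((h :: t)[i], (i : Int))) (X, (j : Int)))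
        (Y, (i : Int))).Perm
      ((Y, (i : Int)) :: (X, (j : Int)) ::
        ((pairsLo (h :: t)).erase ((h :: t)[j], (j : Int))).erase ((h :: t)[i], (i : Int))) :=
    (pinsert_perm _ _).trans (((pinsert_perm _ _).trans (hLperm.cons _)).cons _)
  exact eB.trans ((e1.trans (e2.cons _)).symm)

lemma couple_update_hi (h : Int) (t : List Int) (i j : Nat)
    (hilt : i < (h :: t).length) (hjlt : j < (h :: t).length) (hij : i ≠ j) (X Y : Int)
    (hi : List (Int × Int)) (hp2 : hi.Perm (pairsHi (h :: t))) (hs2 : hi.Pairwise PltP) :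
    (pinsert (pinsert (premove (premove hi ((h :: t)[j], -(j : Int))) ((h :: t)[i], -(i : Int)))
        (X, -(j : Int))) (Y, -(i : Int))).Perm (pairsHi (((h :: t).set j X).set i Y)) ∧
    (pinsert (pinsert (premove (premove hi ((h :: t)[j], -(j : Int))) ((h :: t)[i], -(i : Int)))
        (X, -(j : Int))) (Y, -(i : Int))).Pairwise PltP := by
  have hnd := pairsHi_nodup (h :: t)
  have hlonodup : hi.Nodup := hp2.symm.nodup hnd
  have hjmem : ((h :: t)[j], -(j : Int)) ∈ pairsHi (h :: t) := mem_pairsHi.mpr ⟨j, hjlt, rfl⟩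
  have himem : ((h :: t)[i], -(i : Int)) ∈ pairsHi (h :: t) := mem_pairsHi.mpr ⟨i, hilt, rfl⟩
  have hjhi : ((h :: t)[j], -(j : Int)) ∈ hi := hp2.mem_iff.mpr hjmem
  have hne1 : ((h :: t)[i], -(i : Int)) ≠ ((h :: t)[j], -(j : Int)) := by
    intro he; have := congrArg Prod.snd he; simp at this; omega
  rw [premove_of_mem hjhi]
  have hihi : ((h :: t)[i], -(i : Int)) ∈ hi.erase ((h :: t)[j], -(j : Int)) :=
    (List.Nodup.mem_erase_iff hlonodup).mpr ⟨hne1, hp2.mem_iff.mpr himem⟩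
  rw [premove_of_mem hihi]
  have hLs : ((hi.erase ((h :: t)[j], -(j : Int))).erase ((h :: t)[i], -(i : Int))).Pairwise PltP :=
    List.Pairwise.erase _ (List.Pairwise.erase _ hs2)
  have hLperm : ((hi.erase ((h :: t)[j], -(j : Int))).erase ((h :: t)[i], -(i : Int))).Perm
      (((pairsHi (h :: t)).erase ((h :: t)[j], -(j : Int))).erase ((h :: t)[i], -(i : Int))) :=
    (hp2.erase _).erase _
  have hLsnd : ∀ q ∈ (hi.erase ((h :: t)[j], -(j : Int))).erase ((h :: t)[i], -(i : Int)),
      q.2 ≠ -(j : Int) ∧ q.2 ≠ -(i : Int) := by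
    intro q hq
    obtain ⟨hq1, hq2, hq3⟩ := mem_erase2 hnd _ _ q (hLperm.mem_iff.mp hq)
    obtain ⟨k, hk, rfl⟩ := mem_pairsHi.mp hq3
    constructor
    · intro he
      have hkj : k = j := by simp at he; omega
      subst hkj; exact hq1 rfl
    · intro he
      have hki : k = i := by simp at he; omega
      subst hki; exact hq2 rfl
  have hn1 : (X, -(j : Int)) ∉ (hi.erase ((h :: t)[j], -(j : Int))).erase
      ((h :: t)[i], -(i : Int)) := fun hmem => ((hLsnd _ hmem).1 rfl)
  have hs3 := pinsert_pairwise hLs hn1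
  have hn2 : (Y, -(i : Int)) ∉ pinsert
      ((hi.erase ((h :: t)[j], -(j : Int))).erase ((h :: t)[i], -(i : Int))) (X, -(j : Int)) := by
    intro hmem
    rcases List.mem_cons.mp ((pinsert_perm _ _).mem_iff.mp hmem) with he | hin
    · have := congrArg Prod.snd he; simp at this; omega
    · exact (hLsnd _ hin).2 rfl
  refine ⟨?_, pinsert_pairwise hs3 hn2⟩
  have hget : ((h :: t).set j X)[i]'(by simpa using hilt) = (h :: t)[i] :=
    List.getElem_set_ne (by omega) _
  have e1 : (pairsHi (((h :: t).set j X).set i Y)).Perm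
      ((Y, -(i : Int)) :: (pairsHi ((h :: t).set j X)).erase ((h :: t)[i], -(i : Int))) := by
    have := pairsHi_set ((h :: t).set j X) i Y (by simpa using hilt)
    rwa [hget] at this
  have e2 : ((pairsHi ((h :: t).set j X)).erase ((h :: t)[i], -(i : Int))).Perm
      ((X, -(j : Int)) :: ((pairsHi (h :: t)).erase ((h :: t)[j], -(j : Int))).erase
        ((h :: t)[i], -(i : Int))) := by
    have h3 := (pairsHi_set (h :: t) j X hjlt).erase ((h :: t)[i], -(i : Int))
    rwa [List.erase_cons_tail (by
      simp only [beq_iff_eq]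
      intro he
      have := congrArg Prod.snd he
      simp at this; omega)] at h3
  have eB : (pinsert (pinsert
      ((hi.erase ((h :: t)[j], -(j : Int))).erase ((h :: t)[i], -(i : Int))) (X, -(j : Int)))
        (Y, -(i : Int))).Perm
      ((Y, -(i : Int)) :: (X, -(j : Int)) ::
        ((pairsHi (h :: t)).erase ((h :: t)[j], -(j : Int))).erase ((h :: t)[i], -(i : Int))) :=
    (pinsert_perm _ _).trans (((pinsert_perm _ _).trans (hLperm.cons _)).cons _)
  exact eB.trans ((e1.trans (e2.cons _)).symm)

-- the coupled loop: A's array state and B's two pair lists evolve in lockstep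
lemma loop_couple (N : Int) : ∀ (fuel : Nat) (sa : List Int) (lo hi : List (Int × Int))
    (ans : List (List Int)), sa ≠ [] →
    lo.Perm (pairsLo sa) → lo.Pairwise PltP →
    hi.Perm (pairsHi sa) → hi.Pairwise PltP →
    (solveLoopA N fuel sa ans).2 = (solveLoopB N fuel lo hi ans).2.2 ∧
    (solveLoopB N fuel lo hi ans).1.Perm (pairsLo (solveLoopA N fuel sa ans).1) ∧
    (solveLoopA N fuel sa ans).1.length = sa.length := by
  intro fuel
  induction fuel with
  | zero => intro sa lo hi ans _ hp1 _ _ _; exact ⟨rfl, hp1, rfl⟩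
  | succ n ih =>
    intro sa lo hi ans hne hp1 hs1 hp2 hs2
    obtain ⟨h, t, rfl⟩ : ∃ h t, sa = h :: t := by
      cases sa with
      | nil => exact absurd rfl hne
      | cons h t => exact ⟨h, t, rfl⟩
    obtain ⟨i, hidx, hhead⟩ := lo_head _ h t rfl lo hp1 hs1
    obtain ⟨j, hjdx, hlast⟩ := hi_last _ h t rfl hi hp2 hs2
    obtain ⟨hilt, hieq, hifirst⟩ := PySem.List.getElem_of_index?_eq_some hidx
    obtain ⟨hjlt, hjeq, hjfirst⟩ := PySem.List.getElem_of_index?_eq_some hjdx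
    unfold solveLoopA solveLoopB
    dsimp only
    rw [hlast]
    dsimp only
    rw [hidx, hjdx, hhead]
    simp only [Option.getD_some, neg_neg]
    by_cases hg : (PySem.List.max? (h :: t) (fun x => x)).getD 0 ≤ 0
    · rw [if_pos hg, if_pos hg]
      exact ⟨rfl, hp1, rfl⟩
    · rw [if_neg hg, if_neg hg]
      have hsami : PySem.List.pyGetD (h :: t) ((i : Nat) : Int) 0
          = (PySem.List.min? (h :: t) fun x => x).getD 0 := by
        rw [PySem.List.pyGetD_natCast, List.getD_eq_getElem _ _ hilt, hieq]
      have hsamj : PySem.List.pyGetD (h :: t) ((j : Nat) : Int) 0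
          = (PySem.List.max? (h :: t) fun x => x).getD 0 := by
        rw [PySem.List.pyGetD_natCast, List.getD_eq_getElem _ _ hjlt, hjeq]
      rw [hsami, hsamj]
      simp only [PySem.List.pySetD_natCast]
      set MIN := (PySem.List.min? (h :: t) fun x => x).getD 0 with hMINd
      set MAX := (PySem.List.max? (h :: t) fun x => x).getD 0 with hMAXd
      set MAX' := if N < (i : Int) + 1 + MIN + MAX then N - ((i : Int) + 1 + MIN) else MAX
        with hM'
      by_cases hij : (i : Int) = (j : Int)
      · rw [if_neg (not_not_intro hij)]
        have hijn : i = j := by exact_mod_cast hij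
        subst hijn
        have hget2 : PySem.List.pyGetD ((h :: t).set i (MAX - MAX')) ((i : Nat) : Int) 0
            = MAX - MAX' := by
          rw [PySem.List.pyGetD_natCast, List.getD_eq_getElem _ _ (by simpa using hilt),
            List.getElem_set_self (by simpa using hilt)]
        rw [hget2, List.set_set]
        have hback : MAX - MAX' + MAX' = (h :: t)[i] := by rw [hjeq]; ring
        rw [hback, List.set_getElem_self]
        exact ih (h :: t) lo hi _ hne hp1 hs1 hp2 hs2
      · rw [if_pos hij]
        have hijn : i ≠ j := fun he => hij (by exact_mod_cast he)
        have hget2 : PySem.List.pyGetD ((h :: t).set j (MAX - MAX')) ((i : Nat) : Int) 0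
            = MIN := by
          rw [PySem.List.pyGetD_natCast, List.getD_eq_getElem _ _ (by simpa using hilt),
            List.getElem_set_ne (by omega), hieq]
        rw [hget2]
        rw [← hieq, ← hjeq]
        obtain ⟨cl1, cl2⟩ := couple_update_lo h t i j hilt hjlt hijn
          ((h :: t)[j] - MAX') ((h :: t)[i] + MAX') lo hp1 hs1
        obtain ⟨ch1, ch2⟩ := couple_update_hi h t i j hilt hjlt hijn
          ((h :: t)[j] - MAX') ((h :: t)[i] + MAX') hi hp2 hs2
        obtain ⟨e1, e2, e3⟩ := ih (((h :: t).set j ((h :: t)[j] - MAX')).set i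
            ((h :: t)[i] + MAX'))
          (pinsert (pinsert (premove (premove lo ((h :: t)[j], (j : Int)))
            ((h :: t)[i], (i : Int))) ((h :: t)[j] - MAX', (j : Int)))
            ((h :: t)[i] + MAX', (i : Int)))
          (pinsert (pinsert (premove (premove hi ((h :: t)[j], -(j : Int)))
            ((h :: t)[i], -(i : Int))) ((h :: t)[j] - MAX', -(j : Int)))
            ((h :: t)[i] + MAX', -(i : Int)))
          (ans ++ [[(j : Int) + 1, (j : Int) + 1, (i : Int) + 1, (i : Int) + 1, MAX']])
          (by simp) cl1 cl2 ch1 ch2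
        exact ⟨e1, e2, by rw [e3]; simp⟩

-- rebuilding the final array from any permutation of its pair list
lemma foldl_set_length (g : Int × Int → Int) :
    ∀ (l : List (Int × Int)) (u : List Int),
    (l.foldl (fun u p => PySem.List.pySetD u p.2 (g p)) u).length = u.length := by
  intro l
  induction l with
  | nil => intro u; rfl
  | cons q t ih =>
    intro u
    rw [List.foldl_cons, ih]
    exact PySem.List.length_pySetD u q.2 (g q)

lemma foldl_set_other (g : Int × Int → Int) (j : Nat) :
    ∀ (l : List (Int × Int)) (u : List Int), (∀ p ∈ l, 0 ≤ p.2) →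
    (∀ p ∈ l, p.2 ≠ (j : Int)) →
    (l.foldl (fun u p => PySem.List.pySetD u p.2 (g p)) u).getD j 0 = u.getD j 0 := by
  intro l
  induction l with
  | nil => intro u _ _; rfl
  | cons q t ih =>
    intro u hnn hne
    rw [List.foldl_cons,
      ih _ (fun p hp => hnn p (List.mem_cons_of_mem _ hp))
        (fun p hp => hne p (List.mem_cons_of_mem _ hp))]
    rw [PySem.List.pySetD_of_nonneg _ _ (hnn q (List.mem_cons_self ..))]
    have hq : q.2.toNat ≠ j := by
      have h1 := hnn q (List.mem_cons_self ..)
      have h2 := hne q (List.mem_cons_self ..)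
      omega
    simp [List.getD_eq_getElem?_getD, List.getElem?_set_ne hq]

lemma foldl_set_mem (g : Int × Int → Int) (j : Nat) :
    ∀ (l : List (Int × Int)) (u : List Int) (p0 : Int × Int), p0 ∈ l → p0.2 = (j : Int) →
    (∀ p ∈ l, 0 ≤ p.2) → (l.map Prod.snd).Nodup → j < u.length →
    (l.foldl (fun u p => PySem.List.pySetD u p.2 (g p)) u).getD j 0 = g p0 := by
  intro l
  induction l with
  | nil => intro u p0 h; cases h
  | cons q t ih =>
    intro u p0 hmem hj hnn hnd hlen
    rw [List.foldl_cons]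
    have hnd2 : q.2 ∉ t.map Prod.snd ∧ (t.map Prod.snd).Nodup := by
      rw [List.map_cons, List.nodup_cons] at hnd; exact hnd
    rcases List.mem_cons.mp hmem with rfl | hmem'
    · have hother : ∀ p ∈ t, p.2 ≠ (j : Int) := by
        intro p hp hpe
        exact hnd2.1 (List.mem_map.mpr ⟨p, hp, show Prod.snd p = p0.2 by rw [show Prod.snd p = p.2 from rfl, hpe, hj]⟩)
      rw [foldl_set_other g j t _ (fun p hp => hnn p (List.mem_cons_of_mem _ hp)) hother]
      rw [PySem.List.pySetD_of_nonneg _ _ (hnn p0 (List.mem_cons_self ..))]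
      have hq : p0.2.toNat = j := by
        have := hnn p0 (List.mem_cons_self ..); omega
      rw [hq]
      simp [List.getD_eq_getElem?_getD, List.getElem?_set_self (by omega : j < u.length)]
    · rw [ih _ p0 hmem' hj (fun p hp => hnn p (List.mem_cons_of_mem _ hp)) hnd2.2
        (by rw [PySem.List.length_pySetD]; exact hlen)]

lemma rebuild (sa : List Int) (lo : List (Int × Int)) (hperm : lo.Perm (pairsLo sa)) :
    lo.foldl (fun u p => PySem.List.pySetD u p.2 (p.1 + p.2 + 1)) (List.replicate sa.length 0)
      = (PySem.List.enumerate sa).map (fun q => q.2 + q.1 + 1) := by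
  have hnn : ∀ p ∈ lo, 0 ≤ p.2 := by
    intro p hp
    obtain ⟨k, hk, rfl⟩ := mem_pairsLo.mp (hperm.mem_iff.mp hp)
    simp
  have hnd : (lo.map Prod.snd).Nodup := by
    refine ((hperm.map Prod.snd).nodup_iff).mpr ?_
    have : ((pairsLo sa).map Prod.snd).Pairwise (fun a b => a ≠ b) :=
      List.pairwise_map.mpr ((pairsLo_pairwise_snd sa).imp (fun h => by omega))
    exact this
  have hlen1 : (lo.foldl (fun u p => PySem.List.pySetD u p.2 (p.1 + p.2 + 1))
      (List.replicate sa.length 0)).length = sa.length := by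
    rw [foldl_set_length]; exact List.length_replicate
  refine List.ext_getElem (by rw [hlen1]; simp [PySem.List.length_enumerate]) ?_
  intro k h1 h2
  have hk : k < sa.length := by rwa [hlen1] at h1
  have hmem : (sa[k], (k : Int)) ∈ lo := hperm.mem_iff.mpr (mem_pairsLo.mpr ⟨k, hk, rfl⟩)
  have hL := foldl_set_mem (fun p => p.1 + p.2 + 1) k lo (List.replicate sa.length 0)
    (sa[k], (k : Int)) hmem rfl hnn hnd (by simpa using hk)
  rw [List.getD_eq_getElem _ 0 h1] at hL
  rw [hL]
  rw [List.getElem_map, PySem.List.getElem_enumerate]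
  simp

-- A's init/fin loops as maps (reused shape lemma)
lemma foldl_set_read (g : Int → Int → Int) :
    ∀ (suf pre : List Int),
    (PySem.List.pyRange (pre.length : Int) ((pre.length : Int) + (suf.length : Int))).foldl
      (fun sa i => PySem.List.pySetD sa i (g i (PySem.List.pyGetD sa i 0))) (pre ++ suf)
    = pre ++ (PySem.List.enumerate suf (pre.length : Int)).map (fun p => g p.1 p.2) := by
  intro suf
  induction suf with
  | nil =>
    intro pre
    simp [PySem.List.pyRange_one_eq_nil (le_refl _), PySem.List.enumerate_nil]
  | cons v rest ih =>
    intro pre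
    have hlt : (pre.length : Int) < (pre.length : Int) + ((v :: rest).length : Int) := by
      simp only [List.length_cons]; push_cast; omega
    rw [PySem.List.pyRange_one_cons hlt, List.foldl_cons]
    have hget : PySem.List.pyGetD (pre ++ v :: rest) (pre.length : Int) 0 = v := by
      rw [PySem.List.pyGetD_natCast]
      simp [List.getD_eq_getElem?_getD]
    have hset : PySem.List.pySetD (pre ++ v :: rest) (pre.length : Int)
        (g (pre.length : Int) v) = (pre ++ [g (pre.length : Int) v]) ++ rest := by
      rw [PySem.List.pySetD_natCast]
      rw [List.set_append]
      simp
    rw [hget, hset]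
    have harg : ((pre.length : Int) + 1) = (((pre ++ [g (pre.length : Int) v]).length : Int)) := by
      simp
    have hbound : (pre.length : Int) + ((v :: rest).length : Int)
        = ((pre ++ [g (pre.length : Int) v]).length : Int) + (rest.length : Int) := by
      simp; omega
    rw [harg, hbound, ih (pre ++ [g (pre.length : Int) v])]
    rw [PySem.List.enumerate_cons]
    rw [List.map_cons]
    rw [List.append_assoc, List.singleton_append]
    rw [harg]

lemma init_eq (N : Int) (A : List Int) (hN : 0 ≤ N) :
    solveInitA N A = (PySem.List.pyRange 0 N).map (fun i => PySem.List.pyGetD A i 0 - i - 1) := by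
  have := foldl_set_read (fun i _ => PySem.List.pyGetD A i 0 - i - 1) (List.replicate N.toNat 0) []
  simp only [List.length_nil, Nat.cast_zero, zero_add, List.nil_append, List.length_replicate] at this
  unfold solveInitA
  have hN' : ((N.toNat : Nat) : Int) = N := Int.toNat_of_nonneg hN
  rw [← hN']
  rw [show ((N.toNat:Int)).toNat = N.toNat from by omega]
  rw [this]
  rw [PySem.List.enumerate_eq_map_pyRange (List.replicate N.toNat 0) 0]
  rw [List.map_map]
  simp [PySem.List.len]

lemma fin_eq (N : Int) (sa : List Int) (h : (sa.length : Int) = N) :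
    solveFinA N sa = (PySem.List.enumerate sa).map (fun q => q.2 + q.1 + 1) := by
  have := foldl_set_read (fun i v => v + i + 1) sa []
  simp only [List.length_nil, Nat.cast_zero, zero_add, List.nil_append] at this
  unfold solveFinA
  rw [← h]
  exact this

-- B's init fold builds sorted permutations of pairsLo/pairsHi of the initial array
lemma pinsert_foldl : ∀ (ps acc : List (Int × Int)), acc.Pairwise PltP →
    ps.Nodup → (∀ p ∈ ps, p ∉ acc) →
    (ps.foldl pinsert acc).Perm (acc ++ ps) ∧ (ps.foldl pinsert acc).Pairwise PltP := by
  intro ps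
  induction ps with
  | nil => intro acc hpw _ _; exact ⟨by simp, hpw⟩
  | cons p t ih =>
    intro acc hpw hnd hdisj
    have hpacc : p ∉ acc := hdisj p (List.mem_cons_self ..)
    have hpw' := pinsert_pairwise hpw hpacc
    have hperm' := pinsert_perm acc p
    obtain ⟨hnd1, hnd2⟩ := List.nodup_cons.mp hnd
    have hdisj' : ∀ q ∈ t, q ∉ pinsert acc p := by
      intro q hq hqin
      rcases List.mem_cons.mp (hperm'.mem_iff.mp hqin) with rfl | hin
      · exact hnd1 hq
      · exact hdisj q (List.mem_cons_of_mem _ hq) hin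
    obtain ⟨ha, hb⟩ := ih (pinsert acc p) hpw' hnd2 hdisj'
    refine ⟨?_, hb⟩
    exact ha.trans ((hperm'.append_right t).trans List.perm_middle.symm)

lemma init_couple (N : Int) (A : List Int) (hN : 0 ≤ N) :
    (solveInitB N A).1.Perm (pairsLo (solveInitA N A)) ∧ (solveInitB N A).1.Pairwise PltP ∧
    (solveInitB N A).2.Perm (pairsHi (solveInitA N A)) ∧ (solveInitB N A).2.Pairwise PltP := by
  have hinit := init_eq N A hN
  set vA : Int → Int := fun i => PySem.List.pyGetD A i 0 - i - 1 with hvA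
  have hB : solveInitB N A
      = ((PySem.List.pyRange 0 N).foldl (fun l i => pinsert l (vA i, i)) [],
         (PySem.List.pyRange 0 N).foldl (fun l i => pinsert l (vA i, -i)) []) := by
    unfold solveInitB
    exact PySem.List.foldl_prod_mk (fun l i => pinsert l (vA i, i))
      (fun l i => pinsert l (vA i, -i)) (PySem.List.pyRange 0 N) [] []
  -- index bookkeeping for the range
  have hnodupLo : ((PySem.List.pyRange 0 N).map (fun i => (vA i, i))).Nodup := by
    have : ((PySem.List.pyRange 0 N).map (fun i => (vA i, i))).Pairwise (fun a b => a ≠ b) :=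
      List.pairwise_map.mpr ((PySem.List.pairwise_lt_pyRange_one 0 N).imp
        (fun h he => by have := congrArg Prod.snd he; simp at this; omega))
    exact this
  have hnodupHi : ((PySem.List.pyRange 0 N).map (fun i => (vA i, -i))).Nodup := by
    have : ((PySem.List.pyRange 0 N).map (fun i => (vA i, -i))).Pairwise (fun a b => a ≠ b) :=
      List.pairwise_map.mpr ((PySem.List.pairwise_lt_pyRange_one 0 N).imp
        (fun h he => by have := congrArg Prod.snd he; simp at this; omega))
    exact this
  have hfoldLo := pinsert_foldl ((PySem.List.pyRange 0 N).map (fun i => (vA i, i))) []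
    (List.Pairwise.nil) hnodupLo (by intro p _ hp; cases hp)
  have hfoldHi := pinsert_foldl ((PySem.List.pyRange 0 N).map (fun i => (vA i, -i))) []
    (List.Pairwise.nil) hnodupHi (by intro p _ hp; cases hp)
  rw [List.foldl_map] at hfoldLo hfoldHi
  -- the target pair lists
  have hlenInit : PySem.List.len (solveInitA N A) = N := by
    unfold PySem.List.len
    rw [hinit]
    simp [PySem.List.length_pyRange_one]
    omega
  have hpLo : pairsLo (solveInitA N A) = (PySem.List.pyRange 0 N).map (fun i => (vA i, i)) := by
    unfold pairsLo
    rw [PySem.List.enumerate_eq_map_pyRange (solveInitA N A) 0, hlenInit, List.map_map]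
    refine List.map_congr_left ?_
    intro j hj
    obtain ⟨h0, hN'⟩ := PySem.List.mem_pyRange_one.mp hj
    obtain ⟨k, rfl⟩ : ∃ k : Nat, j = (k : Int) := ⟨j.toNat, by omega⟩
    have hkN : k < N.toNat := by omega
    simp only [Function.comp_apply]
    rw [hinit, show N = ((N.toNat : Nat) : Int) by omega,
      PySem.List.pyGetD_map_pyRange vA N.toNat k 0 hkN]
  have hpHi : pairsHi (solveInitA N A) = (PySem.List.pyRange 0 N).map (fun i => (vA i, -i)) := by
    unfold pairsHi
    rw [PySem.List.enumerate_eq_map_pyRange (solveInitA N A) 0, hlenInit, List.map_map]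
    refine List.map_congr_left ?_
    intro j hj
    obtain ⟨h0, hN'⟩ := PySem.List.mem_pyRange_one.mp hj
    obtain ⟨k, rfl⟩ : ∃ k : Nat, j = (k : Int) := ⟨j.toNat, by omega⟩
    have hkN : k < N.toNat := by omega
    simp only [Function.comp_apply]
    rw [hinit, show N = ((N.toNat : Nat) : Int) by omega,
      PySem.List.pyGetD_map_pyRange vA N.toNat k 0 hkN]
  rw [hB, hpLo, hpHi]
  exact ⟨by simpa using hfoldLo.1, hfoldLo.2, by simpa using hfoldHi.1, hfoldHi.2⟩

-- ===== VERDICT (by name: the statement is the Claim_ definition above) =====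
theorem solve_spec : Claim_equal_solve := by
  intro N K A _hdom hpre
  unfold Spec_solve solve solve_alt
  dsimp only
  rcases hpre with ⟨hN, hK⟩ | ⟨h0, hlen⟩
  · have hKt : K.toNat = 0 := Int.toNat_of_nonpos hK
    have hNt : N.toNat = 0 := Int.toNat_of_nonpos hN
    simp [solveInitA, solveInitB, solveFinA, PySem.List.pyRange_one_eq_nil hN, hNt, hKt,
      solveLoopA, solveLoopB]
  · have hinit := init_eq N A (le_of_lt h0)
    have hlen0 : (solveInitA N A).length = N.toNat := by
      rw [hinit]; simp [PySem.List.length_pyRange_one]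
    have hne : solveInitA N A ≠ [] := by
      intro hnil; have := congrArg List.length hnil; rw [hlen0] at this; simp at this; omega
    obtain ⟨hp1, hs1, hp2, hs2⟩ := init_couple N A (le_of_lt h0)
    obtain ⟨hans, hperm', hlen'⟩ := loop_couple N K.toNat (solveInitA N A)
      (solveInitB N A).1 (solveInitB N A).2 [] hne hp1 hs1 hp2 hs2
    set r := solveLoopB N K.toNat (solveInitB N A).1 (solveInitB N A).2 []
    set p := solveLoopA N K.toNat (solveInitA N A) []
    have hlf : p.1.length = N.toNat := by rw [hlen', hlen0]
    have hreb := rebuild p.1 r.1 hperm'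
    rw [hlf] at hreb
    refine Prod.ext ?_ hans
    dsimp only
    rw [hreb, fin_eq N p.1 (by rw [hlf]; exact Int.toNat_of_nonneg (le_of_lt h0))]
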